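-- pv_equiv track=rewrite | github.com/Robock/problem_solving | interview_code_14.py | abba
-- ===== SOURCE A (Python) =====
-- def abba(sample_string):
--
-- 	three = ''
-- 	new_string = ''
--
-- 	for ch in sample_string:
-- 		if len(three) == 0:
-- 			if ch == 'x':
-- 				three += ch
-- 			else:
-- 				three = ''
-- 		elif len(three) == 1:
-- 			if ch == 'x' or ch == 'y':
-- 				three += ch
-- 			else:
-- 				three = ''
-- 		elif len(three) == 2:
-- 			if three == 'xx':
-- 				if ch == 'x':
-- 					new_string += 'A'
-- 					three = ''
-- 				elif ch == 'y':
-- 					three = 'xy'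
-- 				else:
-- 					three = ''
-- 			elif three == 'xy':
-- 				if ch == 'x':
-- 					new_string += 'B'
-- 					three = ''
-- 				else:
-- 					three = ''
--
--
-- 	return new_string
-- ===== SOURCE B (Python) =====
-- def abba(sample_string):
--     # Pointer-jump pattern matcher: instead of a per-character state machine,
--     # scan with an index, match the token 'xxx' -> 'A', 'xyx'/'xxyx' -> 'B'
--     # by direct lookahead, and jump past the consumed characters.
--     s = sample_string
--     n = len(s)
--     out = []
--     i = 0
--     while i < n:
--         if s[i] != 'x':
--             i += 1
--         elif i + 1 >= n:
--             break
--         elif s[i + 1] == 'x':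
--             if i + 2 >= n:
--                 break
--             if s[i + 2] == 'x':
--                 out.append('A')
--                 i += 3
--             elif s[i + 2] == 'y':
--                 if i + 3 >= n:
--                     break
--                 if s[i + 3] == 'x':
--                     out.append('B')
--                 i += 4
--             else:
--                 i += 3
--         elif s[i + 1] == 'y':
--             if i + 2 >= n:
--                 break
--             if s[i + 2] == 'x':
--                 out.append('B')
--             i += 3
--         else:
--             i += 2
--     return ''.join(out)
-- ===== Notes on version B (the rewrite author's own statement) =====
-- stated objective: alternative
-- what changed: Replaces A's one-character-at-a-time state machine (buffer 'three' of seen chars) with an index-jump pattern matcher that looks ahead to match whole tokens 'xxx'->'A' and 'xyx'/'xxyx'->'B' and skips past the consumed characters in one step.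
import Mathlib
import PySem

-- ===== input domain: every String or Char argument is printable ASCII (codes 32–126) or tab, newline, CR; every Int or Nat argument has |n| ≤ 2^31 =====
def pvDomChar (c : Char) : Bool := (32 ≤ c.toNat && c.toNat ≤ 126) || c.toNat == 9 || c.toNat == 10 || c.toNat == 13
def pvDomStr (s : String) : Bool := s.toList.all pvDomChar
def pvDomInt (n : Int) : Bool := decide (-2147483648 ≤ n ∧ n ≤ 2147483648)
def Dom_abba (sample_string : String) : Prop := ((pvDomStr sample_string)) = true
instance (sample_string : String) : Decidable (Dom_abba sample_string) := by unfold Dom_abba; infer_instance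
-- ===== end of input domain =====

-- B replaces A's per-character state machine with an index-jump lookahead matcher for the tokens xxx/xyx/xxyx (same cost; different algorithmic decomposition).

-- ===== PORT A =====
def abbaStep (st : String × String) (ch : Char) : String × String :=
  let three := st.1
  let new_string := st.2
  if three.length == 0 then
    if ch == 'x' then (three.push ch, new_string) else ("", new_string)
  else if three.length == 1 then
    if ch == 'x' || ch == 'y' then (three.push ch, new_string) else ("", new_string)
  else if three.length == 2 then
    if three == "xx" then
      if ch == 'x' then ("", new_string ++ "A")
      else if ch == 'y' then ("xy", new_string)
      else ("", new_string)
    else if three == "xy" then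
      if ch == 'x' then ("", new_string ++ "B")
      else ("", new_string)
    else st
  else st

def abba (sample_string : String) : String :=
  (sample_string.toList.foldl abbaStep ("", "")).2

-- ===== PORT B =====
-- B's while loop with index jumps, transcribed as recursion on the unscanned
-- suffix: advancing i by k corresponds to dropping k characters.
def abbaAltGo : List Char → List String → List String
  | [], acc => acc
  | c :: rest, acc =>
    if c ≠ 'x' then abbaAltGo rest acc
    else match rest with
      | [] => acc                                   -- i+1 >= n: break
      | c1 :: rest1 =>
        if c1 = 'x' then
          match rest1 with
          | [] => acc                               -- i+2 >= n: break
          | c2 :: rest2 =>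
            if c2 = 'x' then abbaAltGo rest2 (acc ++ ["A"])
            else if c2 = 'y' then
              match rest2 with
              | [] => acc                           -- i+3 >= n: break
              | c3 :: rest3 =>
                if c3 = 'x' then abbaAltGo rest3 (acc ++ ["B"])
                else abbaAltGo rest3 acc
            else abbaAltGo rest2 acc
        else if c1 = 'y' then
          match rest1 with
          | [] => acc                               -- i+2 >= n: break
          | c2 :: rest2 =>
            if c2 = 'x' then abbaAltGo rest2 (acc ++ ["B"])
            else abbaAltGo rest2 acc
        else abbaAltGo rest1 acc
termination_by l _ => l.length
decreasing_by all_goals simp <;> omega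

def abba_alt (sample_string : String) : String :=
  String.join (abbaAltGo sample_string.toList [])

-- ===== PRECONDITION & SPEC =====
def Spec_abba (sample_string : String) (out : String) : Prop := out = abba_alt sample_string
instance (sample_string : String) (out : String) : Decidable (Spec_abba sample_string out) := by unfold Spec_abba; infer_instance

-- ===== CLAIM (what is proved, stated in full; the proofs are below) =====
def Claim_equal_abba : Prop := ∀ (sample_string : String), Dom_abba sample_string → Spec_abba sample_string (abba sample_string)

-- ===== LEMMAS AND PROOFS =====

-- Proof-only wrapper: B's matcher started with an empty output list.
def abbaOut (chars : List Char) : List String := abbaAltGo chars []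

-- One-step unfolding lemmas for B's matcher.
lemma go_nil (acc : List String) : abbaAltGo [] acc = acc := by
  rw [abbaAltGo.eq_def]

lemma go_other (c : Char) (rest : List Char) (acc : List String) (h : ¬ c = 'x') :
    abbaAltGo (c :: rest) acc = abbaAltGo rest acc := by
  rw [abbaAltGo.eq_def]; simp [h]

lemma go_x_end (acc : List String) : abbaAltGo ['x'] acc = acc := by
  rw [abbaAltGo.eq_def]; simp

lemma go_xx_end (acc : List String) : abbaAltGo ['x', 'x'] acc = acc := by
  rw [abbaAltGo.eq_def]; simp

lemma go_xxy_end (acc : List String) : abbaAltGo ['x', 'x', 'y'] acc = acc := by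
  rw [abbaAltGo.eq_def]; simp

lemma go_xxx (rest : List Char) (acc : List String) :
    abbaAltGo ('x' :: 'x' :: 'x' :: rest) acc = abbaAltGo rest (acc ++ ["A"]) := by
  rw [abbaAltGo.eq_def]; simp

lemma go_xxyx (rest : List Char) (acc : List String) :
    abbaAltGo ('x' :: 'x' :: 'y' :: 'x' :: rest) acc = abbaAltGo rest (acc ++ ["B"]) := by
  rw [abbaAltGo.eq_def]; simp

lemma go_xxy_other (c3 : Char) (rest : List Char) (acc : List String) (h : ¬ c3 = 'x') :
    abbaAltGo ('x' :: 'x' :: 'y' :: c3 :: rest) acc = abbaAltGo rest acc := by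
  rw [abbaAltGo.eq_def]; simp [h]

lemma go_xx_other (c2 : Char) (rest : List Char) (acc : List String)
    (h1 : ¬ c2 = 'x') (h2 : ¬ c2 = 'y') :
    abbaAltGo ('x' :: 'x' :: c2 :: rest) acc = abbaAltGo rest acc := by
  rw [abbaAltGo.eq_def]; simp [h1, h2]

lemma go_xy_end (acc : List String) : abbaAltGo ['x', 'y'] acc = acc := by
  rw [abbaAltGo.eq_def]; simp

lemma go_xyx (rest : List Char) (acc : List String) :
    abbaAltGo ('x' :: 'y' :: 'x' :: rest) acc = abbaAltGo rest (acc ++ ["B"]) := by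
  rw [abbaAltGo.eq_def]; simp

lemma go_xy_other (c2 : Char) (rest : List Char) (acc : List String) (h : ¬ c2 = 'x') :
    abbaAltGo ('x' :: 'y' :: c2 :: rest) acc = abbaAltGo rest acc := by
  rw [abbaAltGo.eq_def]; simp [h]

lemma go_x_other (c1 : Char) (rest : List Char) (acc : List String)
    (h1 : ¬ c1 = 'x') (h2 : ¬ c1 = 'y') :
    abbaAltGo ('x' :: c1 :: rest) acc = abbaAltGo rest acc := by
  rw [abbaAltGo.eq_def]; simp [h1, h2]

-- B's recursion distributes over a prefix of its accumulator.
lemma go_acc (chars : List Char) :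
    ∀ (acc a : List String), abbaAltGo chars (a ++ acc) = a ++ abbaAltGo chars acc := by
  induction chars, ([] : List String) using abbaAltGo.induct
  all_goals try simp only [ne_eq, not_not] at *
  all_goals try subst_vars
  all_goals intro acc a
  all_goals simp_all [go_nil, go_other, go_x_end, go_xx_end, go_xxy_end, go_xy_end,
    go_xxx, go_xxyx, go_xyx, go_xxy_other, go_xx_other, go_xy_other, go_x_other]

-- B's recursion only ever appends to its accumulator.
lemma abbaAltGo_shift (chars : List Char) (acc : List String) :
    abbaAltGo chars acc = acc ++ abbaOut chars := by
  have h := go_acc chars [] acc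
  simpa [abbaOut] using h

-- Token-level shape of B's output list.
lemma out_nil : abbaOut [] = [] := go_nil []
lemma out_other (c : Char) (rest : List Char) (h : ¬ c = 'x') :
    abbaOut (c :: rest) = abbaOut rest := go_other c rest [] h
lemma out_x_end : abbaOut ['x'] = [] := go_x_end []
lemma out_xx_end : abbaOut ['x', 'x'] = [] := go_xx_end []
lemma out_xxy_end : abbaOut ['x', 'x', 'y'] = [] := go_xxy_end []
lemma out_xy_end : abbaOut ['x', 'y'] = [] := go_xy_end []
lemma out_xxx (rest : List Char) : abbaOut ('x' :: 'x' :: 'x' :: rest) = "A" :: abbaOut rest := by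
  rw [abbaOut, go_xxx, abbaAltGo_shift]; rfl
lemma out_xxyx (rest : List Char) :
    abbaOut ('x' :: 'x' :: 'y' :: 'x' :: rest) = "B" :: abbaOut rest := by
  rw [abbaOut, go_xxyx, abbaAltGo_shift]; rfl
lemma out_xyx (rest : List Char) : abbaOut ('x' :: 'y' :: 'x' :: rest) = "B" :: abbaOut rest := by
  rw [abbaOut, go_xyx, abbaAltGo_shift]; rfl
lemma out_xxy_other (c3 : Char) (rest : List Char) (h : ¬ c3 = 'x') :
    abbaOut ('x' :: 'x' :: 'y' :: c3 :: rest) = abbaOut rest := go_xxy_other c3 rest [] h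
lemma out_xx_other (c2 : Char) (rest : List Char) (h1 : ¬ c2 = 'x') (h2 : ¬ c2 = 'y') :
    abbaOut ('x' :: 'x' :: c2 :: rest) = abbaOut rest := go_xx_other c2 rest [] h1 h2
lemma out_xy_other (c2 : Char) (rest : List Char) (h : ¬ c2 = 'x') :
    abbaOut ('x' :: 'y' :: c2 :: rest) = abbaOut rest := go_xy_other c2 rest [] h
lemma out_x_other (c1 : Char) (rest : List Char) (h1 : ¬ c1 = 'x') (h2 : ¬ c1 = 'y') :
    abbaOut ('x' :: c1 :: rest) = abbaOut rest := go_x_other c1 rest [] h1 h2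

lemma abba_sfold (l : List String) (s : String) :
    l.foldl (· ++ ·) s = s ++ String.join l := by
  induction l generalizing s with
  | nil => simp [String.join]
  | cons a t ih =>
      have h2 : String.join (a :: t) = a ++ String.join t := by
        simp only [String.join, List.foldl_cons]
        rw [ih]
        simp only [String.empty_append]
        rw [ih]
        rfl
      rw [List.foldl_cons, ih, h2, String.append_assoc]

lemma abba_join_cons (e : String) (l : List String) :
    String.join (e :: l) = e ++ String.join l := by
  simp only [String.join, List.foldl_cons]
  rw [abba_sfold]
  simp only [String.empty_append]
  rw [abba_sfold]
  rfl

lemma abba_len1 : ("x" : String).length = 1 := by decide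
lemma abba_len2x : ("xx" : String).length = 2 := by decide
lemma abba_len2y : ("xy" : String).length = 2 := by decide
lemma abba_push1 : ("" : String).push 'x' = "x" := by decide
lemma abba_push2 : ("x" : String).push 'x' = "xx" := by decide
lemma abba_push3 : ("x" : String).push 'y' = "xy" := by decide

-- A's single steps on its four reachable buffer states.
lemma stepE_x (ns : String) : abbaStep ("", ns) 'x' = ("x", ns) := by
  simp [abbaStep, abba_push1]
lemma stepE_o (c : Char) (ns : String) (h : ¬ c = 'x') : abbaStep ("", ns) c = ("", ns) := by
  simp [abbaStep, h]
lemma stepX_x (ns : String) : abbaStep ("x", ns) 'x' = ("xx", ns) := by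
  simp [abbaStep, abba_len1, abba_push2]
lemma stepX_y (ns : String) : abbaStep ("x", ns) 'y' = ("xy", ns) := by
  simp [abbaStep, abba_len1, abba_push3]
lemma stepX_o (c : Char) (ns : String) (hx : ¬ c = 'x') (hy : ¬ c = 'y') :
    abbaStep ("x", ns) c = ("", ns) := by
  simp [abbaStep, abba_len1, hx, hy]
lemma stepXX_x (ns : String) : abbaStep ("xx", ns) 'x' = ("", ns ++ "A") := by
  simp [abbaStep, abba_len2x]
lemma stepXX_y (ns : String) : abbaStep ("xx", ns) 'y' = ("xy", ns) := by
  simp [abbaStep, abba_len2x]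
lemma stepXX_o (c : Char) (ns : String) (hx : ¬ c = 'x') (hy : ¬ c = 'y') :
    abbaStep ("xx", ns) c = ("", ns) := by
  simp [abbaStep, abba_len2x, hx, hy]
lemma stepXY_x (ns : String) : abbaStep ("xy", ns) 'x' = ("", ns ++ "B") := by
  simp [abbaStep, abba_len2y]
lemma stepXY_o (c : Char) (ns : String) (h : ¬ c = 'x') : abbaStep ("xy", ns) c = ("", ns) := by
  simp [abbaStep, abba_len2y, h]

lemma abba_join_nil : String.join [] = "" := rfl

-- A's fold from the empty state equals B's token matcher.
lemma abba_loop (chars : List Char) :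
    ∀ ns : String, (chars.foldl abbaStep ("", ns)).2 = ns ++ String.join (abbaOut chars) := by
  induction chars, ([] : List String) using abbaAltGo.induct
  all_goals try simp only [ne_eq, not_not] at *
  all_goals try subst_vars
  all_goals intro ns
  all_goals simp_all [List.foldl_cons, List.foldl_nil,
    stepE_x, stepE_o, stepX_x, stepX_y, stepX_o, stepXX_x, stepXX_y, stepXX_o,
    stepXY_x, stepXY_o,
    out_nil, out_other, out_x_end, out_xx_end, out_xxy_end, out_xy_end,
    out_xxx, out_xxyx, out_xyx, out_xxy_other, out_xx_other, out_xy_other, out_x_other,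
    abba_join_cons, abba_join_nil, String.append_assoc]

-- ===== VERDICT (by name: the statement is the Claim_ definition above) =====
theorem abba_spec : Claim_equal_abba := by
  intro s _
  unfold Spec_abba abba abba_alt
  have h := abba_loop s.toList ""
  simp only [abbaOut] at h
  simpa using h
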